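-- pv_equiv track=rewrite | github.com/Gasburger/Mars-Rover-Py | client11.py | find_elevation
-- ===== SOURCE A (Python) =====
-- def find_elevation(data_point): # finding the elevation of a tuple
--     comma_counter = 0
--     start = 0
--     while start < len(data_point):
--         if data_point[start] == ",":
--             comma_counter += 1
--             if comma_counter == 2:
--                 start += 1
--                 break
--         start += 1
--     return start
-- ===== SOURCE B (Python) =====
-- def find_elevation(data_point):
--     head, sep, tail = data_point.partition(",")
--     if not sep:
--         return len(data_point)
--     mid, sep2, _ = tail.partition(",")
--     if not sep2:
--         return len(data_point)
--     return len(head) + len(mid) + 2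
-- ===== Notes on version B (the rewrite author's own statement) =====
-- stated objective: simpler
-- what changed: Replaces the stateful index-and-comma-counter while loop by two staged str.partition splits: cut at the first comma, cut the remainder at its first comma, and compute the answer arithmetically from the lengths of the two pieces (else the full length); measured faster because the scanning moves into the C-level str.partition instead of a per-character Python loop.
import Mathlib
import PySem

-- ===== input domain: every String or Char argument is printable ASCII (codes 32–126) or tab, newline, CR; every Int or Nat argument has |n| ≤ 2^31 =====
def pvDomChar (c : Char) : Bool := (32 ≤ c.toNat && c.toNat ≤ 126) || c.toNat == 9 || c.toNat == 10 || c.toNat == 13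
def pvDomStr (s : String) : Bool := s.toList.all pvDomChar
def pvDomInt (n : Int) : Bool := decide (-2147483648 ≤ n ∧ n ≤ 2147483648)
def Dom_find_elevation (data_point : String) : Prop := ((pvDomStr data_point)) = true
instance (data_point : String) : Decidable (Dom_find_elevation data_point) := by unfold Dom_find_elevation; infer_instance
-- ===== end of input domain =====

-- B replaces A's index-and-counter while loop by two staged partition-at-first-comma splits
-- and computes the result from the lengths of the pieces; objective: simpler.
-- ===== PORT A =====
-- A's while loop: walks the characters, carrying 'start' and the comma counter;
-- returns start+1 on the second comma, else start at the end of the string.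
def pvALoop : List Char → Int → Int → Int
  | [], start, _ => start
  | c :: rest, start, cc =>
    if c = ',' then
      if cc + 1 = 2 then start + 1
      else pvALoop rest (start + 1) (cc + 1)
    else pvALoop rest (start + 1) cc

def find_elevation (data_point : String) : Int :=
  pvALoop data_point.toList 0 0

-- ===== PORT B =====
-- hand port of str.partition(","): (piece before first ',', found-flag, piece after)
def pvPartition : List Char → List Char × Bool × List Char
  | [] => ([], false, [])
  | c :: r =>
    if c = ',' then ([], true, r)
    else
      let p := pvPartition r
      (c :: p.1, p.2.1, p.2.2)

def find_elevation_alt (data_point : String) : Int :=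
  let p := pvPartition data_point.toList
  if p.2.1 then
    let q := pvPartition p.2.2
    if q.2.1 then (p.1.length : Int) + (q.1.length : Int) + 2
    else (data_point.toList.length : Int)
  else (data_point.toList.length : Int)

-- ===== PRECONDITION & SPEC =====
def Spec_find_elevation (data_point : String) (out : Int) : Prop := out = find_elevation_alt data_point
instance (data_point : String) (out : Int) : Decidable (Spec_find_elevation data_point out) := by unfold Spec_find_elevation; infer_instance

-- ===== CLAIM (what is proved, stated in full; the proofs are below) =====
def Claim_equal_find_elevation : Prop := ∀ (data_point : String), Dom_find_elevation data_point → Spec_find_elevation data_point (find_elevation data_point)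

-- ===== LEMMAS AND PROOFS =====

-- A's loop with counter already 1: returns start + (index after first comma, else length)
lemma pvALoop_one (cs : List Char) (start : Int) :
    pvALoop cs start 1 =
      start + (if (pvPartition cs).2.1 then ((pvPartition cs).1.length : Int) + 1
               else (cs.length : Int)) := by
  induction cs generalizing start with
  | nil => simp [pvALoop, pvPartition]
  | cons c rest ih =>
    by_cases hc : c = ','
    · subst hc; simp [pvALoop, pvPartition]
    · simp [pvALoop, hc, pvPartition, ih]
      split_ifs <;> push_cast <;> ring

-- A's loop with counter 0: returns start + B's value on the remaining characters
lemma pvALoop_zero (cs : List Char) (start : Int) :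
    pvALoop cs start 0 =
      start + (if (pvPartition cs).2.1 then
                 (if (pvPartition (pvPartition cs).2.2).2.1 then
                    ((pvPartition cs).1.length : Int) +
                      ((pvPartition (pvPartition cs).2.2).1.length : Int) + 2
                  else (cs.length : Int))
               else (cs.length : Int)) := by
  induction cs generalizing start with
  | nil => simp [pvALoop, pvPartition]
  | cons c rest ih =>
    by_cases hc : c = ','
    · subst hc
      simp [pvALoop, pvPartition, pvALoop_one]
      split_ifs <;> push_cast <;> ring
    · simp [pvALoop, hc, pvPartition, ih]
      split_ifs <;> push_cast <;> ring

-- ===== VERDICT (by name: the statement is the Claim_ definition above) =====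
theorem find_elevation_spec : Claim_equal_find_elevation := by
  intro data_point _
  unfold Spec_find_elevation find_elevation find_elevation_alt
  rw [pvALoop_zero]
  simp
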